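-- pv_equiv track=rewrite | github.com/casellimarco/raoc | 2023/17/main.py | is_too_straight
-- ===== SOURCE A (Python) =====
-- def is_too_straight(node, adjNode, parentsMap, straight_maximum, visited):
--     maybe_line = [node, adjNode]
--     previous_node = node
--     for _ in range(straight_maximum-1):
--         if previous_node not in parentsMap:
--             return False
--         previous_node = parentsMap[previous_node]
--         maybe_line.append(previous_node)
--     maybe_line_visited = set(n for n in maybe_line) & visited
--     if len(maybe_line_visited) < straight_maximum:
--         return False
--     for i in range(2):
--     	if len(set([n[i] for n in maybe_line])) == 1:
--             return True
--     return False
-- ===== SOURCE B (Python) =====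
-- def is_too_straight(node, adjNode, parentsMap, straight_maximum, visited):
--     def straight_along(axis):
--         # abort the walk the moment the line bends on this axis
--         if adjNode[axis] != node[axis]:
--             return False
--         seen = set()
--         if node in visited:
--             seen.add(node)
--         if adjNode in visited:
--             seen.add(adjNode)
--         cur = node
--         for _ in range(straight_maximum - 1):
--             if cur not in parentsMap:
--                 return False
--             cur = parentsMap[cur]
--             if cur[axis] != node[axis]:
--                 return False
--             if cur in visited:
--                 seen.add(cur)
--         return len(seen) >= straight_maximum
--     return straight_along(0) or straight_along(1)
-- ===== Notes on version B (the rewrite author's own statement) =====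
-- stated objective: alternative
-- what changed: B splits the test into two independent single-axis scans of the parent chain (straight_along(0) or straight_along(1)), each aborting its walk the moment its coordinate bends, instead of materialising the whole maybe_line list and then scanning it for the visited intersection and once per coordinate.
import Mathlib
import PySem

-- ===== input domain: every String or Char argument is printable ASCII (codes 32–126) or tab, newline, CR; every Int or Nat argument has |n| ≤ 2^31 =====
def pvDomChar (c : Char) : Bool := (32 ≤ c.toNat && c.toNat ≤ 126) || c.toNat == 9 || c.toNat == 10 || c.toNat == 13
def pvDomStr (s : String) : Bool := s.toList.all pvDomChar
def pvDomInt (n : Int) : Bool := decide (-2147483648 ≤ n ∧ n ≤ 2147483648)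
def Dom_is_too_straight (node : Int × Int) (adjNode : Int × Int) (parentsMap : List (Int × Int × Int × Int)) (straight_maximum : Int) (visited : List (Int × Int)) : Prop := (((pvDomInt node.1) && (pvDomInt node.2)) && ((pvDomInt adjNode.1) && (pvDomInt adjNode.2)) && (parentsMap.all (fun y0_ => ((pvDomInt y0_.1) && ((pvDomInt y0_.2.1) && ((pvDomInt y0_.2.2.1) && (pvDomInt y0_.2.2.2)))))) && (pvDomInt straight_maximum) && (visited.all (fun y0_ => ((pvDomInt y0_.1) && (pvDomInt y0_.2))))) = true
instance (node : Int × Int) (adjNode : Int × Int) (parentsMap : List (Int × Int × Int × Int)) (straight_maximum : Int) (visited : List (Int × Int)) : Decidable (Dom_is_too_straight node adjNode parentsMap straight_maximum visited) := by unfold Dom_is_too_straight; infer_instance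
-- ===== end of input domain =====

-- B replaces A's build-the-line-then-scan-it-three-times with two independent single-axis
-- walks of the parent chain, each aborting at the first bend (alternative decomposition, same cost class).

-- shared: the Python dict parentsMap rebuilt from the flattened 4-tuples (both ports receive the same dict)
def pvParentsDict (parentsMap : List (Int × Int × Int × Int)) : PySem.Dict (Int × Int) (Int × Int) :=
  PySem.Dict.ofList (parentsMap.map (fun e => ((e.1, e.2.1), (e.2.2.1, e.2.2.2))))

-- ===== PORT A =====
-- A's for-loop: state = (previous_node, maybe_line); early `return False` = none
def pvLoopA (pm : PySem.Dict (Int × Int) (Int × Int)) :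
    Nat → (Int × Int) → List (Int × Int) → Option (List (Int × Int))
  | 0, _, acc => some acc
  | k+1, prev, acc =>
    match PySem.Dict.get? pm prev with
    | none => none
    | some p => pvLoopA pm k p (acc ++ [p])

def is_too_straight (node : Int × Int) (adjNode : Int × Int) (parentsMap : List (Int × Int × Int × Int)) (straight_maximum : Int) (visited : List (Int × Int)) : Bool :=
  match pvLoopA (pvParentsDict parentsMap) (straight_maximum - 1).toNat node [node, adjNode] with
  | none => false
  | some maybe_line =>
    -- len(set(n for n in maybe_line) & visited) < straight_maximum
    if ((PySem.Set.inter (PySem.Set.ofList maybe_line) visited).length : Int) < straight_maximum then false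
    -- for i in range(2): if len(set([n[i] for n in maybe_line])) == 1: return True
    else if (PySem.Set.ofList (maybe_line.map (fun n => n.1))).length = 1 then true
    else if (PySem.Set.ofList (maybe_line.map (fun n => n.2))).length = 1 then true
    else false

-- ===== PORT B =====
-- the for-loop of straight_along: early `return False` on a missing parent or a bend,
-- else accumulate the visited in-line nodes and compare the tally at the end
def pvRun (pm : PySem.Dict (Int × Int) (Int × Int)) (visited : List (Int × Int)) (nv : Int)
    (m : Int) (f : Int × Int → Int) : Nat → (Int × Int) → PySem.Set (Int × Int) → Bool
  | 0, _, seen => decide (m ≤ (seen.length : Int))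
  | k+1, cur, seen =>
    match PySem.Dict.get? pm cur with
    | none => false
    | some p =>
      if f p != nv then false
      else pvRun pm visited nv m f k p
        (if PySem.Set.contains visited p then PySem.Set.add seen p else seen)

-- straight_along(axis): f is the axis projection
def pvStraightAlong (node adjNode : Int × Int) (pm : PySem.Dict (Int × Int) (Int × Int))
    (m : Int) (visited : List (Int × Int)) (f : Int × Int → Int) : Bool :=
  if f adjNode != f node then false
  else
    let s0 := if PySem.Set.contains visited node then PySem.Set.add PySem.Set.empty node else PySem.Set.empty
    let s1 := if PySem.Set.contains visited adjNode then PySem.Set.add s0 adjNode else s0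
    pvRun pm visited (f node) m f (m - 1).toNat node s1

def is_too_straight_alt (node : Int × Int) (adjNode : Int × Int) (parentsMap : List (Int × Int × Int × Int)) (straight_maximum : Int) (visited : List (Int × Int)) : Bool :=
  pvStraightAlong node adjNode (pvParentsDict parentsMap) straight_maximum visited (fun n => n.1)
  || pvStraightAlong node adjNode (pvParentsDict parentsMap) straight_maximum visited (fun n => n.2)

-- ===== PRECONDITION & SPEC =====
def Spec_is_too_straight (node : Int × Int) (adjNode : Int × Int) (parentsMap : List (Int × Int × Int × Int)) (straight_maximum : Int) (visited : List (Int × Int)) (out : Bool) : Prop := out = is_too_straight_alt node adjNode parentsMap straight_maximum visited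
instance (node : Int × Int) (adjNode : Int × Int) (parentsMap : List (Int × Int × Int × Int)) (straight_maximum : Int) (visited : List (Int × Int)) (out : Bool) : Decidable (Spec_is_too_straight node adjNode parentsMap straight_maximum visited out) := by unfold Spec_is_too_straight; infer_instance

-- ===== CLAIM (what is proved, stated in full; the proofs are below) =====
def Claim_equal_is_too_straight : Prop := ∀ (node : Int × Int) (adjNode : Int × Int) (parentsMap : List (Int × Int × Int × Int)) (straight_maximum : Int) (visited : List (Int × Int)), Dom_is_too_straight node adjNode parentsMap straight_maximum visited → Spec_is_too_straight node adjNode parentsMap straight_maximum visited (is_too_straight node adjNode parentsMap straight_maximum visited)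

-- ===== LEMMAS AND PROOFS =====

-- the visited in-line set accumulated so far = set(acc) & visited
lemma pvInterStep (visited : List (Int × Int)) (acc : List (Int × Int)) (p : Int × Int) :
    (if PySem.Set.contains visited p
       then PySem.Set.add (PySem.Set.inter (PySem.Set.ofList acc) visited) p
       else PySem.Set.inter (PySem.Set.ofList acc) visited)
      = PySem.Set.inter (PySem.Set.ofList (acc ++ [p])) visited := by
  simp only [PySem.Set.ofList_append_singleton, PySem.Set.inter]
  by_cases hv : p ∈ visited
  · have hc : PySem.Set.contains visited p = true := (PySem.Set.contains_iff visited p).mpr hv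
    rw [PySem.Set.add_eq_ite]
    by_cases hm : p ∈ PySem.Set.ofList acc
    · have hmf : p ∈ (PySem.Set.ofList acc).filter (fun x => PySem.Set.contains visited x) :=
        List.mem_filter.mpr ⟨hm, hc⟩
      simp [hm]
    · have hmf : p ∉ (PySem.Set.ofList acc).filter (fun x => PySem.Set.contains visited x) :=
        fun h => hm (List.mem_filter.mp h).1
      simp [hm, hv, List.filter_append]
  · have hc : PySem.Set.contains visited p = false := by
      cases h : PySem.Set.contains visited p
      · rfl
      · exact absurd ((PySem.Set.contains_iff visited p).mp h) hv
    rw [PySem.Set.add_eq_ite]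
    by_cases hm : p ∈ PySem.Set.ofList acc
    · simp [hm]
    · simp [hm, hv, List.filter_append]

-- A's maybe_line is its starting prefix plus appended parents
lemma pvLoopA_shape (pm : PySem.Dict (Int × Int) (Int × Int)) :
    ∀ (k : Nat) (prev : Int × Int) (acc ml : List (Int × Int)),
    pvLoopA pm k prev acc = some ml → ∃ t, ml = acc ++ t := by
  intro k
  induction k with
  | zero =>
    intro prev acc ml h
    exact ⟨[], by simpa [pvLoopA] using h.symm⟩
  | succ k ih =>
    intro prev acc ml h
    simp only [pvLoopA] at h
    cases hg : PySem.Dict.get? pm prev with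
    | none => rw [hg] at h; exact absurd h (by simp)
    | some p =>
      rw [hg] at h
      obtain ⟨t, ht⟩ := ih p (acc ++ [p]) ml h
      exact ⟨p :: t, by simpa using ht⟩

-- B's bend-aborting walk, in terms of A's full line
lemma pvRun_corr (pm : PySem.Dict (Int × Int) (Int × Int)) (visited : List (Int × Int))
    (f : Int × Int → Int) (nv m : Int) :
    ∀ (k : Nat) (prev : Int × Int) (acc : List (Int × Int)),
    acc.all (fun n => f n == nv) = true →
    pvRun pm visited nv m f k prev (PySem.Set.inter (PySem.Set.ofList acc) visited)
      = match pvLoopA pm k prev acc with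
        | none => false
        | some ml => (ml.all (fun n => f n == nv))
            && decide (m ≤ ((PySem.Set.inter (PySem.Set.ofList ml) visited).length : Int)) := by
  intro k
  induction k with
  | zero =>
    intro prev acc hall
    simp [pvRun, pvLoopA, hall]
  | succ k ih =>
    intro prev acc hall
    simp only [pvRun, pvLoopA]
    cases hg : PySem.Dict.get? pm prev with
    | none => rfl
    | some p =>
      simp only []
      by_cases hp : f p = nv
      · have hne : (f p != nv) = false := by simp [hp]
        rw [hne]
        simp only [Bool.false_eq_true, if_false]
        rw [pvInterStep]
        exact ih p (acc ++ [p]) (by simp [List.all_append, hall, hp])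
      · have hne : (f p != nv) = true := by simp [hp]
        rw [hne]
        simp only [if_true]
        cases hA : pvLoopA pm k p (acc ++ [p]) with
        | none => rfl
        | some ml =>
          obtain ⟨t, ht⟩ := pvLoopA_shape pm k p (acc ++ [p]) ml hA
          have : ml.all (fun n => f n == nv) = false := by
            cases hb : ml.all (fun n => f n == nv)
            · rfl
            · have : p ∈ ml := ht ▸ (by simp)
              have := (List.all_eq_true.mp hb) p this
              simp [hp] at this
          simp [this]

-- straight_along(axis) in terms of A's full line
lemma pvStraight_corr (node adjNode : Int × Int) (pm : PySem.Dict (Int × Int) (Int × Int))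
    (m : Int) (visited : List (Int × Int)) (f : Int × Int → Int) :
    pvStraightAlong node adjNode pm m visited f
      = match pvLoopA pm (m - 1).toNat node [node, adjNode] with
        | none => false
        | some ml => (ml.all (fun n => f n == f node))
            && decide (m ≤ ((PySem.Set.inter (PySem.Set.ofList ml) visited).length : Int)) := by
  unfold pvStraightAlong
  have hs0 : (if PySem.Set.contains visited node then PySem.Set.add PySem.Set.empty node else PySem.Set.empty)
      = PySem.Set.inter (PySem.Set.ofList [node]) visited := by
    have := pvInterStep visited [] node
    simpa using this
  by_cases hadj : f adjNode = f node
  · have hne : (f adjNode != f node) = false := by simp [hadj]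
    rw [hne]
    simp only [Bool.false_eq_true, if_false]
    rw [hs0, pvInterStep visited [node] adjNode]
    exact pvRun_corr pm visited f (f node) m _ node [node, adjNode] (by simp [hadj])
  · have hne : (f adjNode != f node) = true := by simp [hadj]
    rw [hne]
    simp only [if_true]
    cases hA : pvLoopA pm (m - 1).toNat node [node, adjNode] with
    | none => rfl
    | some ml =>
      obtain ⟨t, ht⟩ := pvLoopA_shape pm _ node [node, adjNode] ml hA
      have : ml.all (fun n => f n == f node) = false := by
        cases hb : ml.all (fun n => f n == f node)
        · rfl
        · have : adjNode ∈ ml := ht ▸ (by simp)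
          have := (List.all_eq_true.mp hb) adjNode this
          simp [hadj] at this
      simp [this]

-- len(set(xs)) == 1 for a nonempty list ⟺ every element equals the head
lemma pvSingleton_iff {α : Type} [DecidableEq α] (x : α) (ts : List α) :
    (PySem.Set.ofList (x :: ts)).length = 1 ↔ ∀ y ∈ ts, y = x := by
  constructor
  · intro h y hy
    obtain ⟨a, ha⟩ := List.length_eq_one_iff.mp h
    have hx : x ∈ PySem.Set.ofList (x :: ts) :=
      (PySem.Set.mem_ofList _ _).mpr List.mem_cons_self
    have hy' : y ∈ PySem.Set.ofList (x :: ts) :=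
      (PySem.Set.mem_ofList _ _).mpr (List.mem_cons_of_mem _ hy)
    rw [ha] at hx hy'
    simp only [List.mem_singleton] at hx hy'
    rw [hy', hx]
  · intro h
    have hd : PySem.Set.discard (PySem.Set.ofList ts) x = [] := by
      apply List.eq_nil_iff_forall_not_mem.mpr
      intro y hy
      have hmem : y ∈ PySem.Set.ofList ts ∧ y ≠ x := by
        simpa using (PySem.Set.mem_discard (PySem.Set.ofList ts) x y).mp hy
      exact hmem.2 (h y ((PySem.Set.mem_ofList _ _).mp hmem.1))
    rw [PySem.Set.ofList_cons, hd]
    rfl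

lemma pvAllSet (f : (Int × Int) → Int) (x : Int × Int) (ml : List (Int × Int)) :
    ((PySem.Set.ofList ((x :: ml).map f)).length = 1)
      ↔ ((x :: ml).all (fun n => f n == f x) = true) := by
  rw [List.map_cons, pvSingleton_iff]
  simp [List.all_eq_true]
  exact ⟨fun h a b hm => h (f (a, b)) a b hm rfl, fun h y a b hm hy => hy ▸ h a b hm⟩

-- ===== VERDICT (by name: the statement is the Claim_ definition above) =====
theorem is_too_straight_spec : Claim_equal_is_too_straight := by
  intro node adjNode parentsMap straight_maximum visited _
  unfold Spec_is_too_straight is_too_straight is_too_straight_alt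
  rw [pvStraight_corr, pvStraight_corr]
  cases hA : pvLoopA (pvParentsDict parentsMap) (straight_maximum - 1).toNat node [node, adjNode] with
  | none => rfl
  | some ml =>
    simp only []
    obtain ⟨t, ht⟩ := pvLoopA_shape (pvParentsDict parentsMap) _ node [node, adjNode] ml hA
    subst ht
    simp only [List.cons_append, List.nil_append]
    by_cases hlen :
      ((PySem.Set.inter (PySem.Set.ofList (node :: adjNode :: t)) visited).length : Int) < straight_maximum
    · have hd : ¬ (straight_maximum ≤ ((PySem.Set.inter (PySem.Set.ofList (node :: adjNode :: t)) visited).length : Int)) := by omega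
      rw [if_pos hlen]
      simp [hd]
    · have hd : straight_maximum ≤ ((PySem.Set.inter (PySem.Set.ofList (node :: adjNode :: t)) visited).length : Int) := by omega
      rw [if_neg hlen]
      simp only [hd, decide_true, Bool.and_true]
      have h1 := pvAllSet (fun n => n.1) node (adjNode :: t)
      have h2 := pvAllSet (fun n => n.2) node (adjNode :: t)
      by_cases c1 : (PySem.Set.ofList ((node :: adjNode :: t).map (fun n => n.1))).length = 1
      · rw [if_pos c1]
        simp [h1.mp c1]
      · have b1 : ((node :: adjNode :: t).all (fun n => n.1 == node.1)) = false := by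
          cases hb : (node :: adjNode :: t).all (fun n => n.1 == node.1)
          · rfl
          · exact absurd (h1.mpr hb) c1
        rw [if_neg c1]
        by_cases c2 : (PySem.Set.ofList ((node :: adjNode :: t).map (fun n => n.2))).length = 1
        · rw [if_pos c2]
          simp [b1, h2.mp c2]
        · have b2 : ((node :: adjNode :: t).all (fun n => n.2 == node.2)) = false := by
            cases hb : (node :: adjNode :: t).all (fun n => n.2 == node.2)
            · rfl
            · exact absurd (h2.mpr hb) c2
          rw [if_neg c2]
          simp [b1, b2]
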